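-- pv_equiv track=rewrite | github.com/FilipMach01/QR-code | main.py | get_qr_params
-- ===== SOURCE A (Python) =====
-- QR_TABLE_M = {
--     1: (16, 10, 1, 16, 0, 0),
--     2: (28, 16, 1, 28, 0, 0),
--     3: (44, 26, 1, 44, 0, 0),
--     4: (64, 18, 2, 32, 0, 0),
--     5: (86, 24, 2, 43, 0, 0),
--     6: (108, 16, 4, 27, 0, 0),
-- }
--
-- def get_qr_params(url):
--     url_len = len(url)
--     needed_bytes = (4 + 8 + url_len * 8 + 4 + 7) // 8
--     for version in range(1, 7):
--         data_cw = QR_TABLE_M[version][0]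
--         if needed_bytes <= data_cw:
--             return version
--     return None
-- ===== SOURCE B (Python) =====
-- def get_qr_params(url):
--     needed_bytes = (4 + 8 + len(url) * 8 + 4 + 7) // 8
--     caps = [16, 28, 44, 64, 86, 108]
--     lo, hi = 0, 6
--     while lo < hi:
--         mid = (lo + hi) // 2
--         if caps[mid] < needed_bytes:
--             lo = mid + 1
--         else:
--             hi = mid
--     return lo + 1 if lo < 6 else None
-- ===== Notes on version B (the rewrite author's own statement) =====
-- stated objective: alternative
-- what changed: Replaced the first-fit linear scan over the six-entry capacity dict with a bisect_left-style binary search over the sorted capacity list, returning index+1 or None on overflow.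
import Mathlib
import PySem

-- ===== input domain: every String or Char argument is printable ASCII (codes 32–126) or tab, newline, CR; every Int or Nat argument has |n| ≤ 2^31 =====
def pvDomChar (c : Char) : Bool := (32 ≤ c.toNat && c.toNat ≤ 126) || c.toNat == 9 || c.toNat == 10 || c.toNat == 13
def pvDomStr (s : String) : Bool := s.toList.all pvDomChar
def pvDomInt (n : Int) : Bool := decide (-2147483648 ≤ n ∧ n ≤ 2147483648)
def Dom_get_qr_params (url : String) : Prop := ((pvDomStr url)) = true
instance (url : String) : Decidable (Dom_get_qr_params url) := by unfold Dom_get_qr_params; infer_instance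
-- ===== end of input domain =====

-- B replaces A's first-fit linear scan over the capacity dict with a bisect_left-style
-- binary search over the sorted capacity list (objective: alternative).

-- ===== PORT A =====
def qrTableM : PySem.Dict Int (Int × Int × Int × Int × Int × Int) :=
  PySem.Dict.ofList
    [(1, (16, 10, 1, 16, 0, 0)), (2, (28, 16, 1, 28, 0, 0)), (3, (44, 26, 1, 44, 0, 0)),
     (4, (64, 18, 2, 32, 0, 0)), (5, (86, 24, 2, 43, 0, 0)), (6, (108, 16, 4, 27, 0, 0))]

-- the for-loop with early return; the dict key is always present for version ∈ range(1,7)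
def getQrLoop (needed_bytes : Int) : List Int → Option Int
  | [] => none
  | version :: rest =>
    let data_cw := ((PySem.Dict.get? qrTableM version).getD (0, 0, 0, 0, 0, 0)).1
    if needed_bytes ≤ data_cw then some version else getQrLoop needed_bytes rest

def get_qr_params (url : String) : Option Int :=
  let url_len : Int := PySem.Str.len url
  let needed_bytes := PySem.Int.floordiv (4 + 8 + url_len * 8 + 4 + 7) 8
  getQrLoop needed_bytes (PySem.List.pyRange 1 7 1)

-- ===== PORT B =====
def pvCaps : List Int := [16, 28, 44, 64, 86, 108]

-- the while-loop of Source B; lo, hi are nonnegative throughout, so Nat with Nat '/' is exact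
def qrBisect (needed_bytes : Int) (lo hi : Nat) : Nat :=
  if h : lo < hi then
    if pvCaps.getD ((lo + hi) / 2) 0 < needed_bytes then
      qrBisect needed_bytes ((lo + hi) / 2 + 1) hi
    else
      qrBisect needed_bytes lo ((lo + hi) / 2)
  else lo
termination_by hi - lo
decreasing_by all_goals omega

def get_qr_params_alt (url : String) : Option Int :=
  let needed_bytes := PySem.Int.floordiv (4 + 8 + PySem.Str.len url * 8 + 4 + 7) 8
  let lo := qrBisect needed_bytes 0 6
  if lo < 6 then some ((lo : Int) + 1) else none

-- ===== PRECONDITION & SPEC =====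
def Spec_get_qr_params (url : String) (out : Option Int) : Prop := out = get_qr_params_alt url
instance (url : String) (out : Option Int) : Decidable (Spec_get_qr_params url out) := by unfold Spec_get_qr_params; infer_instance

-- ===== CLAIM (what is proved, stated in full; the proofs are below) =====
def Claim_equal_get_qr_params : Prop := ∀ (url : String), Dom_get_qr_params url → Spec_get_qr_params url (get_qr_params url)

-- ===== LEMMAS AND PROOFS =====

lemma qrB_step (needed : Int) (lo hi : Nat) (h : lo < hi) :
    qrBisect needed lo hi =
      if pvCaps.getD ((lo + hi) / 2) 0 < needed then qrBisect needed ((lo + hi) / 2 + 1) hi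
      else qrBisect needed lo ((lo + hi) / 2) := by
  rw [qrBisect]; simp [h]

lemma qrB_end (needed : Int) (lo hi : Nat) (h : ¬ lo < hi) :
    qrBisect needed lo hi = lo := by
  rw [qrBisect]; simp [h]

lemma main_eq (needed : Int) :
    getQrLoop needed (PySem.List.pyRange 1 7 1) =
      (if qrBisect needed 0 6 < 6 then some ((qrBisect needed 0 6 : Int) + 1) else none) := by
  rw [show PySem.List.pyRange 1 7 1 = [1, 2, 3, 4, 5, 6] from by decide]
  simp only [getQrLoop]
  rw [show ((PySem.Dict.get? qrTableM 1).getD (0, 0, 0, 0, 0, 0)).1 = 16 from by decide,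
      show ((PySem.Dict.get? qrTableM 2).getD (0, 0, 0, 0, 0, 0)).1 = 28 from by decide,
      show ((PySem.Dict.get? qrTableM 3).getD (0, 0, 0, 0, 0, 0)).1 = 44 from by decide,
      show ((PySem.Dict.get? qrTableM 4).getD (0, 0, 0, 0, 0, 0)).1 = 64 from by decide,
      show ((PySem.Dict.get? qrTableM 5).getD (0, 0, 0, 0, 0, 0)).1 = 86 from by decide,
      show ((PySem.Dict.get? qrTableM 6).getD (0, 0, 0, 0, 0, 0)).1 = 108 from by decide]
  simp [qrB_step, qrB_end, pvCaps]
  split_ifs <;> first | rfl | omega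

-- ===== VERDICT (by name: the statement is the Claim_ definition above) =====
theorem get_qr_params_spec : Claim_equal_get_qr_params := by
  intro url _
  unfold Spec_get_qr_params get_qr_params get_qr_params_alt
  exact main_eq _
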